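-- pv_equiv track=rewrite | github.com/lengthwisehems/retail2 | citizensofhumanity_inventory.py | derive_style_name
-- ===== SOURCE A (Python) =====
-- from typing import Any, Dict, Iterable, List, Optional, Tuple
--
-- def derive_style_name(product_title: str) -> str:
--     lower = product_title.lower()
--     if " in " in lower:
--         base = product_title[: lower.index(" in ")].strip()
--     else:
--         base = product_title.strip()
--     tokens = base.split()
--     movers = {"petite", "reworked", "rework"}
--     moved: List[str] = []
--     kept: List[str] = []
--     for token in tokens:
--         if token.lower() in movers:
--             moved.append(token)
--         else:
--             kept.append(token)
--     style_name = " ".join(kept + moved).strip()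
--     return style_name
-- ===== SOURCE B (Python) =====
-- def derive_style_name(product_title: str) -> str:
--     lower = product_title.lower()
--     if " in " in lower:
--         base = product_title[: lower.index(" in ")].strip()
--     else:
--         base = product_title.strip()
--     movers = {"petite", "reworked", "rework"}
--     return " ".join(sorted(base.split(), key=lambda t: t.lower() in movers))
-- ===== Notes on version B (the rewrite author's own statement) =====
-- stated objective: idiomatic
-- what changed: A's explicit partition loop into kept/moved accumulator lists plus a trailing strip is replaced by a single stable sort of the tokens keyed on mover-membership of the lowercased token, joined directly: stability puts non-movers first and movers last, each in original order, and joining split tokens never needs stripping.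
import Mathlib
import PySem

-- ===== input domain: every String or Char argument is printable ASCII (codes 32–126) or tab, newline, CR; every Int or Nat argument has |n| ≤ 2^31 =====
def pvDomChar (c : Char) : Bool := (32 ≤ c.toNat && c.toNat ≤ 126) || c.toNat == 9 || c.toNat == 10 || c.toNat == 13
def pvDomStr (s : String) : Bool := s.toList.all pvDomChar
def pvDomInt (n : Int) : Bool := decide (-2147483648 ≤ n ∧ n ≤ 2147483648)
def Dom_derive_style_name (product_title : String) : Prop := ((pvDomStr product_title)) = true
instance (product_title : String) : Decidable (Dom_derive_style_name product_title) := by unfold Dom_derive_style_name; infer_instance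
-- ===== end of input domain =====

-- B replaces A's two-accumulator partition loop and trailing strip by one stable sort on a
-- boolean key (non-movers before movers, each block in original order); objective: idiomatic.

-- ===== PORT A =====
def derive_style_name (product_title : String) : String :=
  let lower := PySem.Str.lower product_title
  let base :=
    if PySem.Str.isIn " in " lower then
      PySem.Str.strip (PySem.Str.slice product_title none (some (PySem.Str.find lower " in ")))
    else
      PySem.Str.strip product_title
  let tokens := PySem.Str.split₀ base
  let movers : PySem.Set String := PySem.Set.ofList ["petite", "reworked", "rework"]
  -- the for-loop over tokens, carried as the pair (kept, moved)
  let km := tokens.foldl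
    (fun (acc : List String × List String) token =>
      if movers.contains (PySem.Str.lower token) then (acc.1, acc.2 ++ [token])
      else (acc.1 ++ [token], acc.2))
    ([], [])
  PySem.Str.strip (PySem.Str.join " " (km.1 ++ km.2))

-- ===== PORT B =====
def derive_style_name_alt (product_title : String) : String :=
  let lower := PySem.Str.lower product_title
  let base :=
    if PySem.Str.isIn " in " lower then
      PySem.Str.strip (PySem.Str.slice product_title none (some (PySem.Str.find lower " in ")))
    else
      PySem.Str.strip product_title
  let movers : PySem.Set String := PySem.Set.ofList ["petite", "reworked", "rework"]
  PySem.Str.join " "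
    (PySem.List.sorted (PySem.Str.split₀ base)
      (fun t => movers.contains (PySem.Str.lower t)))

-- ===== PRECONDITION & SPEC =====
def Spec_derive_style_name (product_title : String) (out : String) : Prop := out = derive_style_name_alt product_title
instance (product_title : String) (out : String) : Decidable (Spec_derive_style_name product_title out) := by unfold Spec_derive_style_name; infer_instance

-- ===== CLAIM (what is proved, stated in full; the proofs are below) =====
def Claim_equal_derive_style_name : Prop := ∀ (product_title : String), Dom_derive_style_name product_title → Spec_derive_style_name product_title (derive_style_name product_title)

-- ===== LEMMAS AND PROOFS =====

-- inserting a non-mover passes over the non-mover block and lands before the mover block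
theorem insertBy_boolKey_false {α : Type} (k : α → Bool) (x : α) (A B : List α)
    (hx : k x = false) (hA : ∀ a ∈ A, k a = false) (hB : ∀ b ∈ B, k b = true) :
    PySem.List.insertBy (fun a b => decide (k a < k b)) x (A ++ B) = A ++ x :: B := by
  induction A with
  | nil =>
    cases B with
    | nil => simp [PySem.List.insertBy]
    | cons b B' =>
      have hb := hB b (by simp)
      simp [PySem.List.insertBy, hx, hb]
  | cons a A' ih =>
    have ha := hA a (by simp)
    simp only [List.cons_append, PySem.List.insertBy]
    rw [if_neg (by simp [ha, hx])]
    rw [ih (fun a' h => hA a' (by simp [h]))]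

-- inserting a mover: nothing compares above `true`, so it goes to the very end
theorem insertBy_boolKey_true {α : Type} (k : α → Bool) (x : α) (l : List α)
    (hx : k x = true) :
    PySem.List.insertBy (fun a b => decide (k a < k b)) x l = l ++ [x] := by
  induction l with
  | nil => simp [PySem.List.insertBy]
  | cons y l' ih =>
    simp only [PySem.List.insertBy]
    rw [if_neg (by simp [hx])]
    rw [ih]; simp

theorem foldl_insertBy_boolKey {α : Type} (k : α → Bool) (xs : List α) :
    ∀ (A B : List α), (∀ a ∈ A, k a = false) → (∀ b ∈ B, k b = true) →
    xs.foldl (fun acc x => PySem.List.insertBy (fun a b => decide (k a < k b)) x acc) (A ++ B)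
      = (A ++ xs.filter (fun x => !k x)) ++ (B ++ xs.filter k) := by
  induction xs with
  | nil => intro A B _ _; simp
  | cons x xs ih =>
    intro A B hA hB
    cases hx : k x with
    | false =>
      rw [List.foldl_cons, insertBy_boolKey_false k x A B hx hA hB,
        show A ++ x :: B = (A ++ [x]) ++ B by simp,
        ih (A ++ [x]) B ?_ hB]
      · simp [hx]
      · intro a ha
        rcases List.mem_append.1 ha with h | h
        · exact hA a h
        · simp at h; subst h; exact hx
    | true =>
      rw [List.foldl_cons, insertBy_boolKey_true k x (A ++ B) hx,
        List.append_assoc, ih A (B ++ [x]) hA ?_]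
      · simp [hx]
      · intro b hb
        rcases List.mem_append.1 hb with h | h
        · exact hB b h
        · simp at h; subst h; exact hx

-- a stable sort on a Bool key is exactly "non-movers then movers", each in original order
theorem sorted_boolKey {α : Type} (xs : List α) (k : α → Bool) :
    PySem.List.sorted xs k = xs.filter (fun x => !k x) ++ xs.filter k := by
  rw [PySem.List.sorted_eq_foldl_insertBy]
  have h := foldl_insertBy_boolKey k xs [] [] (by simp) (by simp)
  simpa using h

-- A's single loop with the pair (kept, moved) computes the two filters
theorem foldl_pair_filter {α : Type} (k : α → Bool) (xs : List α) (K M : List α) :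
    xs.foldl (fun (acc : List α × List α) t =>
        if k t then (acc.1, acc.2 ++ [t]) else (acc.1 ++ [t], acc.2)) (K, M)
      = (K ++ xs.filter (fun t => !k t), M ++ xs.filter k) := by
  induction xs generalizing K M with
  | nil => simp
  | cons x xs ih =>
    cases hx : k x <;> simp [hx, ih]

-- every piece produced by str.split() is nonempty and whitespace-free
theorem split₀_go_pieces (s cur : List Char) (acc : List (List Char))
    (hcur : ∀ c ∈ cur, PySem.Chars.isspace c = false)
    (hacc : ∀ p ∈ acc, p ≠ [] ∧ ∀ c ∈ p, PySem.Chars.isspace c = false) :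
    ∀ p ∈ PySem.Chars.split₀.go s cur acc, p ≠ [] ∧ ∀ c ∈ p, PySem.Chars.isspace c = false := by
  induction s generalizing cur acc with
  | nil =>
    intro p hp
    rw [PySem.Chars.split₀.go.eq_def] at hp
    dsimp only at hp
    by_cases hc : cur.isEmpty
    · rw [if_pos hc] at hp
      exact hacc p (List.mem_reverse.1 hp)
    · rw [if_neg hc] at hp
      rw [List.mem_reverse] at hp
      rcases List.mem_cons.1 hp with h | h
      · subst h
        exact ⟨by simpa [List.isEmpty_iff] using hc,
          fun c hc' => hcur c (List.mem_reverse.1 hc')⟩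
      · exact hacc p h
  | cons c rest ih =>
    intro p hp
    rw [PySem.Chars.split₀.go.eq_def] at hp
    dsimp only at hp
    by_cases hsp : PySem.Chars.isspace c = true
    · by_cases hc : cur.isEmpty
      · rw [if_pos hsp, if_pos hc] at hp
        exact ih [] acc (by simp) hacc p hp
      · rw [if_pos hsp, if_neg hc] at hp
        refine ih [] (cur.reverse :: acc) (by simp) ?_ p hp
        intro q hq
        rcases List.mem_cons.1 hq with h | h
        · subst h
          exact ⟨by simpa [List.isEmpty_iff] using hc,
            fun d hd => hcur d (List.mem_reverse.1 hd)⟩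
        · exact hacc q h
    · rw [if_neg hsp] at hp
      refine ih (c :: cur) acc ?_ hacc p hp
      intro d hd
      rcases List.mem_cons.1 hd with h | h
      · subst h; simpa using hsp
      · exact hcur d h

theorem split₀_pieces (s : List Char) :
    ∀ p ∈ PySem.Chars.split₀ s, p ≠ [] ∧ ∀ c ∈ p, PySem.Chars.isspace c = false :=
  split₀_go_pieces s [] [] (by simp) (by simp)

-- the join of nonempty whitespace-free pieces starts with a non-space character …
theorem lstrip_join_pieces (parts : List (List Char))
    (h : ∀ p ∈ parts, p ≠ [] ∧ ∀ c ∈ p, PySem.Chars.isspace c = false) :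
    PySem.Chars.lstrip (PySem.Chars.join [' '] parts) = PySem.Chars.join [' '] parts := by
  cases parts with
  | nil => simp [PySem.Chars.join_nil, PySem.Chars.lstrip]
  | cons p ps =>
    obtain ⟨hne, hns⟩ := h p (by simp)
    obtain ⟨c, t, rfl⟩ := List.exists_cons_of_ne_nil hne
    have hc : PySem.Chars.isspace c = false := hns c (by simp)
    cases ps with
    | nil => simp [PySem.Chars.join_singleton, PySem.Chars.lstrip, hc]
    | cons q qs =>
      rw [PySem.Chars.join_cons_cons]
      simp [PySem.Chars.lstrip, hc]

-- … and ends with a non-space character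
theorem join_reverse_head (ps : List (List Char)) (p : List Char)
    (h : ∀ q ∈ p :: ps, q ≠ [] ∧ ∀ c ∈ q, PySem.Chars.isspace c = false) :
    ∃ c t, (PySem.Chars.join [' '] (p :: ps)).reverse = c :: t ∧ PySem.Chars.isspace c = false := by
  induction ps generalizing p with
  | nil =>
    obtain ⟨hne, hns⟩ := h p (by simp)
    obtain ⟨c, t, hct⟩ := List.exists_cons_of_ne_nil (List.reverse_ne_nil_iff.2 hne)
    refine ⟨c, t, ?_, ?_⟩
    · rw [PySem.Chars.join_singleton]; exact hct
    · have : c ∈ p.reverse := by rw [hct]; simp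
      exact hns c (List.mem_reverse.1 this)
  | cons q qs ih =>
    obtain ⟨c, t, hct, hc⟩ := ih q (fun r hr => h r (by simp_all))
    refine ⟨c, t ++ [' '] ++ p.reverse, ?_, hc⟩
    rw [PySem.Chars.join_cons_cons]
    simp [hct]

-- so the trailing strip in A is a no-op on the joined pieces
theorem strip_join_pieces (parts : List (List Char))
    (h : ∀ p ∈ parts, p ≠ [] ∧ ∀ c ∈ p, PySem.Chars.isspace c = false) :
    PySem.Chars.strip (PySem.Chars.join [' '] parts) = PySem.Chars.join [' '] parts := by
  unfold PySem.Chars.strip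
  rw [lstrip_join_pieces parts h]
  cases parts with
  | nil => simp [PySem.Chars.join_nil, PySem.Chars.rstrip]
  | cons p ps =>
    obtain ⟨c, t, hct, hc⟩ := join_reverse_head ps p h
    unfold PySem.Chars.rstrip
    rw [hct]
    simp [List.dropWhile, hc, ← hct]

-- ===== VERDICT (by name: the statement is the Claim_ definition above) =====
theorem derive_style_name_spec : Claim_equal_derive_style_name := by
  intro product_title _
  unfold Spec_derive_style_name derive_style_name derive_style_name_alt
  dsimp only
  generalize (if PySem.Str.isIn " in " (PySem.Str.lower product_title) = true then
      PySem.Str.strip (PySem.Str.slice product_title none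
        (some (PySem.Str.find (PySem.Str.lower product_title) " in ")))
    else PySem.Str.strip product_title) = base
  rw [sorted_boolKey, foldl_pair_filter]
  simp only [List.nil_append]
  have hmem : ∀ p ∈ (PySem.Str.split₀ base).filter
        (fun t => !(PySem.Set.ofList ["petite", "reworked", "rework"]).contains (PySem.Str.lower t)) ++
      (PySem.Str.split₀ base).filter
        (fun t => (PySem.Set.ofList ["petite", "reworked", "rework"]).contains (PySem.Str.lower t)),
      p.toList ≠ [] ∧ ∀ c ∈ p.toList, PySem.Chars.isspace c = false := by
    intro p hp
    have hptok : p ∈ PySem.Str.split₀ base := by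
      rcases List.mem_append.1 hp with h | h <;> exact List.mem_of_mem_filter h
    have : p.toList ∈ PySem.Chars.split₀ base.toList := by
      rw [← PySem.Str.split₀_map_toList]
      exact List.mem_map_of_mem hptok
    exact split₀_pieces base.toList p.toList this
  rw [← String.toList_inj, PySem.Str.toList_strip, PySem.Str.toList_join]
  rw [show (" " : String).toList = [' '] from rfl]
  refine strip_join_pieces _ ?_
  intro q hq
  obtain ⟨p, hp, rfl⟩ := List.mem_map.1 hq
  exact hmem p hp
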